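-- pv_equiv track=rewrite | github.com/MartinPellizzer/martinpellizzer-gen | components.py | breadcrumbs
-- ===== SOURCE A (Python) =====
-- def breadcrumbs(filepath):
--     breadcrumbs = ['<a href="/"><svg xmlns="http://www.w3.org/2000/svg" fill="none" viewBox="0 0 24 24" stroke-width="1.5" stroke="currentColor" class="size-6"><path stroke-linecap="round" stroke-linejoin="round" d="m2.25 12 8.954-8.955c.44-.439 1.152-.439 1.591 0L21.75 12M4.5 9.75v10.125c0 .621.504 1.125 1.125 1.125H9.75v-4.875c0-.621.504-1.125 1.125-1.125h2.25c.621 0 1.125.504 1.125 1.125V21h4.125c.621 0 1.125-.504 1.125-1.125V9.75M8.25 21h8.25"/></svg></a>']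
--     breadcrumbs_path = filepath.replace('website/', '')
--     chunks = breadcrumbs_path.split('/')
--     filepath_curr = ''
--     for chunk in chunks[:-1]:
--         filepath_curr += f'/{chunk}'
--         chunk = chunk.strip().replace('-', ' ').title()
--         breadcrumbs.append(f'<a href="{filepath_curr}.html">{chunk}</a>')
--     breadcrumbs = '<span> > </span>'.join(breadcrumbs)
--     breadcrumbs += f'<span> > {chunks[-1].strip().replace(".html", "").replace("-", " ").title()}</span>'
--     breadcrumbs_section = f'''
--         <section class="breadcrumbs">
--             {breadcrumbs}
--         </section>
--     '''
--
--     return breadcrumbs_section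
-- ===== SOURCE B (Python) =====
-- HOME = '<a href="/"><svg xmlns="http://www.w3.org/2000/svg" fill="none" viewBox="0 0 24 24" stroke-width="1.5" stroke="currentColor" class="size-6"><path stroke-linecap="round" stroke-linejoin="round" d="m2.25 12 8.954-8.955c.44-.439 1.152-.439 1.591 0L21.75 12M4.5 9.75v10.125c0 .621.504 1.125 1.125 1.125H9.75v-4.875c0-.621.504-1.125 1.125-1.125h2.25c.621 0 1.125.504 1.125 1.125V21h4.125c.621 0 1.125-.504 1.125-1.125V9.75M8.25 21h8.25"/></svg></a>'
--
--
-- def _fmt(chunk):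
--     return chunk.strip().replace('-', ' ').title()
--
--
-- def _fmt_last(chunk):
--     return chunk.strip().replace('.html', '').replace('-', ' ').title()
--
--
-- def _go(done, rest):
--     # recursive descent over the raw path string: find the next '/', emit one
--     # link whose href is a substring of the path, recurse on the suffix
--     i = rest.find('/')
--     if i == -1:
--         return '<span> > ' + _fmt_last(rest) + '</span>'
--     cur = done + rest[:i]
--     return ('<span> > </span><a href="' + cur + '.html">' + _fmt(rest[:i]) + '</a>'
--             + _go(cur + '/', rest[i + 1:]))
--
--
-- def breadcrumbs(filepath):
--     path = filepath.replace('website/', '')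
--     body = HOME + _go('/', path)
--     return ('\n        <section class="breadcrumbs">\n            '
--             + body + '\n        </section>\n    ')
-- ===== Notes on version B (the rewrite author's own statement) =====
-- stated objective: alternative
-- what changed: Never splits the path into a chunk list: a recursive descent scans the raw string for the next slash, slices each segment and href substring directly out of the path, and emits the breadcrumb HTML piece by piece, so A's chunk list, accumulator loop, link list and final join all disappear.
import Mathlib
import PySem

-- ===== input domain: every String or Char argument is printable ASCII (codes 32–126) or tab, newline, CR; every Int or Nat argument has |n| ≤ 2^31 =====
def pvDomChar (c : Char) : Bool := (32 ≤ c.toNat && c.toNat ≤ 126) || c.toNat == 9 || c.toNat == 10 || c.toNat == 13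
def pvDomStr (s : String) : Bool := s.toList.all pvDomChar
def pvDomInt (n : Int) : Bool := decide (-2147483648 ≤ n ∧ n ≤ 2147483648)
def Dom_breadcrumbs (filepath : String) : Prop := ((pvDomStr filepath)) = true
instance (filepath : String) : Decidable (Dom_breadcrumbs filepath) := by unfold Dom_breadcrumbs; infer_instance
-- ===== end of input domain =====

-- B never splits the path into a chunk list: a recursive descent scans the raw string for the next slash,
-- slicing each segment and href substring directly out of the path (objective: alternative decomposition).

-- shared port of Python's str.title() (exact on the ASCII domain: a letter is uppercased
-- iff the previous character is not a letter, lowercased otherwise)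
def pvTitleGo : List Char → Bool → List Char
  | [], _ => []
  | c :: cs, prev =>
      (if PySem.Chars.isalpha c then
        (if prev then PySem.Chars.lowerChar c else PySem.Chars.upperChar c)
      else c) :: pvTitleGo cs (PySem.Chars.isalpha c)

def pvTitle (s : String) : String := String.ofList (pvTitleGo s.toList false)

def pvHome : String := "<a href=\"/\"><svg xmlns=\"http://www.w3.org/2000/svg\" fill=\"none\" viewBox=\"0 0 24 24\" stroke-width=\"1.5\" stroke=\"currentColor\" class=\"size-6\"><path stroke-linecap=\"round\" stroke-linejoin=\"round\" d=\"m2.25 12 8.954-8.955c.44-.439 1.152-.439 1.591 0L21.75 12M4.5 9.75v10.125c0 .621.504 1.125 1.125 1.125H9.75v-4.875c0-.621.504-1.125 1.125-1.125h2.25c.621 0 1.125.504 1.125 1.125V21h4.125c.621 0 1.125-.504 1.125-1.125V9.75M8.25 21h8.25\"/></svg></a>"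

-- ===== PORT A =====
-- split? "/" is exact: the separator is nonempty, so split? is always `some` (the .getD [] is never taken);
-- likewise chunks is never [], so pyGet? chunks (-1) is always `some`.
def breadcrumbs (filepath : String) : String :=
  let breadcrumbsPath := PySem.Str.replace filepath "website/" ""
  let chunks := (PySem.Str.split? breadcrumbsPath "/").getD []
  let st := (PySem.List.slice chunks none (some (-1))).foldl
    (fun (st : String × List String) chunk =>
      let fc := st.1 ++ "/" ++ chunk
      let c2 := pvTitle (PySem.Str.replace (PySem.Str.strip chunk) "-" " ")
      (fc, st.2 ++ ["<a href=\"" ++ fc ++ ".html\">" ++ c2 ++ "</a>"]))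
    ("", [pvHome])
  let joined := PySem.Str.join "<span> > </span>" st.2
  let lastC := (PySem.List.pyGet? chunks (-1)).getD ""
  let bc := joined ++ ("<span> > " ++ pvTitle (PySem.Str.replace (PySem.Str.replace (PySem.Str.strip lastC) ".html" "") "-" " ") ++ "</span>")
  "\n        <section class=\"breadcrumbs\">\n            " ++ bc ++ "\n        </section>\n    "

-- ===== PORT B =====
-- Source B's _fmt / _fmt_last, on the List Char side (Python strings are ported through toList; exact)
def pvFmtC (chunk : List Char) : List Char :=
  pvTitleGo (PySem.Chars.replace (PySem.Chars.strip chunk) ['-'] [' ']) false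

def pvFmtLastC (chunk : List Char) : List Char :=
  pvTitleGo (PySem.Chars.replace (PySem.Chars.replace (PySem.Chars.strip chunk) ".html".toList []) ['-'] [' ']) false

-- Source B's _go: recursive descent on the raw path via find with string slices; terminates because
-- a found '/' lies inside rest, so the suffix after it is strictly shorter
def pvGo (done rest : List Char) : List Char :=
  let i := PySem.Chars.find rest ['/']
  if hi : i = -1 then
    "<span> > ".toList ++ pvFmtLastC rest ++ "</span>".toList
  else
    let cur := done ++ rest.take i.toNat
    "<span> > </span><a href=\"".toList ++ cur ++ ".html\">".toList ++ pvFmtC (rest.take i.toNat) ++ "</a>".toList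
      ++ pvGo (cur ++ ['/']) (rest.drop (i.toNat + 1))
termination_by rest.length
decreasing_by
  have h : ['/'] <:+: rest := (PySem.Chars.find_ne_neg_one_iff rest ['/']).mp hi
  have : rest ≠ [] := by rintro rfl; simpa using h.sublist.length_le
  have : 0 < rest.length := List.length_pos_iff.mpr this
  simp only [List.length_drop]; omega

def breadcrumbs_alt (filepath : String) : String :=
  let path := PySem.Str.replace filepath "website/" ""
  let body := pvHome.toList ++ pvGo "/".toList path.toList
  "\n        <section class=\"breadcrumbs\">\n            " ++ String.ofList body ++ "\n        </section>\n    "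

-- ===== PRECONDITION & SPEC =====
def Spec_breadcrumbs (filepath : String) (out : String) : Prop := out = breadcrumbs_alt filepath
instance (filepath : String) (out : String) : Decidable (Spec_breadcrumbs filepath out) := by unfold Spec_breadcrumbs; infer_instance

-- ===== CLAIM (what is proved, stated in full; the proofs are below) =====
def Claim_equal_breadcrumbs : Prop := ∀ (filepath : String), Dom_breadcrumbs filepath → Spec_breadcrumbs filepath (breadcrumbs filepath)

-- ===== LEMMAS AND PROOFS =====

-- structural split at '/' (reference form of Chars.splitOn for the one-char separator)
def pvSp : List Char → List (List Char)
  | [] => [[]]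
  | c :: rest => if c = '/' then [] :: pvSp rest else (pvSp rest).modifyHead (c :: ·)

theorem pvSp_ne_nil (s : List Char) : pvSp s ≠ [] := by
  cases s with
  | nil => simp [pvSp]
  | cons c rest =>
      simp only [pvSp]
      split_ifs
      · simp
      · cases h : pvSp rest with
        | nil => exact absurd h (pvSp_ne_nil rest)
        | cons a l => simp [List.modifyHead]

theorem pvSplitOn_go_eq (s : List Char) : ∀ (fuel : Nat), s.length ≤ fuel → ∀ (cur : List Char) (acc : List (List Char)),
    PySem.Chars.splitOn.go ['/'] fuel s cur acc = acc.reverse ++ (pvSp s).modifyHead (cur.reverse ++ ·) := by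
  induction s with
  | nil =>
      intro fuel _ cur acc
      cases fuel <;> simp [PySem.Chars.splitOn.go, pvSp, List.modifyHead]
  | cons c rest ih =>
      intro fuel hf cur acc
      cases fuel with
      | zero => simp at hf
      | succ n =>
          have hr : rest.length ≤ n := by simpa using hf
          by_cases hc : c = '/'
          · subst hc
            have : List.isPrefixOf ['/'] ('/' :: rest) = true := by simp [List.isPrefixOf]
            simp only [PySem.Chars.splitOn.go, this, if_pos]
            rw [show List.drop (['/'] : List Char).length ('/' :: rest) = rest from by simp]
            rw [ih n hr [] (cur.reverse :: acc)]
            simp only [pvSp, List.modifyHead, List.reverse_cons, List.append_assoc]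
            cases pvSp rest <;> simp
          · have hpre : List.isPrefixOf ['/'] (c :: rest) = false := by
              simp [List.isPrefixOf]; exact fun h => hc h.symm
            simp only [PySem.Chars.splitOn.go, hpre, Bool.false_eq_true, if_neg, not_false_iff]
            rw [ih n hr (c :: cur) acc]
            congr 1
            cases h : pvSp rest with
            | nil => exact absurd h (pvSp_ne_nil rest)
            | cons a l => simp [pvSp, if_neg hc, h, List.modifyHead]

theorem pvSplitOn_eq (s : List Char) : PySem.Chars.splitOn s ['/'] = pvSp s := by
  have := pvSplitOn_go_eq s (s.length + 1) (by omega) [] []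
  simp only [PySem.Chars.splitOn, this, List.reverse_nil, List.nil_append]
  cases h : pvSp s with
  | nil => exact absurd h (pvSp_ne_nil s)
  | cons a l => simp [List.modifyHead]

theorem pvSp_no_slash (s : List Char) (h : '/' ∉ s) : pvSp s = [s] := by
  induction s with
  | nil => rfl
  | cons c rest ih =>
      have hc : c ≠ '/' := fun hc => h (hc ▸ List.mem_cons_self)
      have hr : '/' ∉ rest := fun hr => h (List.mem_cons_of_mem _ hr)
      simp [pvSp, hc, ih hr, List.modifyHead]

theorem pvSp_split (s : List Char) : ∀ (k : Nat) (hk : k < s.length), (∀ j, (hj : j < k) → s[j]'(by omega) ≠ '/') →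
    s[k] = '/' → pvSp s = s.take k :: pvSp (s.drop (k + 1)) := by
  induction s with
  | nil => intro k hk; simp at hk
  | cons c rest ih =>
      intro k hk hmin hcur
      cases k with
      | zero =>
          simp only [List.getElem_cons_zero] at hcur
          simp [pvSp, hcur]
      | succ m =>
          have hc : c ≠ '/' := by
            have := hmin 0 (by omega)
            simpa using this
          have hmin' : ∀ j, (hj : j < m) → rest[j]'(by simp at hk; omega) ≠ '/' := by
            intro j hj
            have := hmin (j + 1) (by omega)
            simpa using this
          have hcur' : rest[m]'(by simp at hk; omega) = '/' := by simpa using hcur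
          rw [show (c :: rest).take (m + 1) = c :: rest.take m from by simp,
              show (c :: rest).drop (m + 1 + 1) = rest.drop (m + 1) from by simp]
          have := ih m (by simp at hk; omega) hmin' hcur'
          simp [pvSp, hc, this, List.modifyHead]

-- the breadcrumb tail Source B's _go produces, as a function of the structural split
def pvLinksStr (done : List Char) : List (List Char) → List Char
  | [] => []
  | [c] => "<span> > ".toList ++ pvFmtLastC c ++ "</span>".toList
  | c :: c2 :: rest =>
      "<span> > </span><a href=\"".toList ++ (done ++ c) ++ ".html\">".toList ++ pvFmtC c ++ "</a>".toList
        ++ pvLinksStr (done ++ c ++ ['/']) (c2 :: rest)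

theorem pvGo_eq_linksStr (n : Nat) : ∀ (rest : List Char), rest.length ≤ n → ∀ (done : List Char),
    pvGo done rest = pvLinksStr done (pvSp rest) := by
  induction n with
  | zero =>
      intro rest hr done
      have : rest = [] := List.eq_nil_of_length_eq_zero (by omega)
      subst this
      rw [pvGo]
      simp [PySem.Chars.find, PySem.Chars.find.go, pvSp, pvLinksStr]
  | succ n ih =>
      intro rest hr done
      rw [pvGo]
      by_cases hi : PySem.Chars.find rest ['/'] = -1
      · have hnin : '/' ∉ rest := fun hm =>
          (PySem.Chars.find_eq_neg_one_iff rest ['/']).mp hi ((List.singleton_infix_iff '/' rest).mpr hm)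
        rw [pvSp_no_slash rest hnin]
        simp [hi, pvLinksStr]
      · set i := PySem.Chars.find rest ['/'] with hidef
        have hinf : ['/'] <:+: rest := (PySem.Chars.find_ne_neg_one_iff rest ['/']).mp hi
        have hnn : (0:Int) ≤ i := (PySem.Chars.find_nonneg_iff rest ['/']).mpr hinf
        obtain ⟨hpre, hmin⟩ := PySem.Chars.find_spec (s := rest) (sub := ['/']) hnn
        obtain ⟨t, ht⟩ := hpre
        have hlt : i.toNat < rest.length := by
          have := congrArg List.length ht
          simp [List.length_drop] at this
          omega
        have hcur : rest[i.toNat] = '/' := by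
          have ht2 := ht
          rw [List.drop_eq_getElem_cons hlt] at ht2
          simp only [List.singleton_append, List.cons.injEq] at ht2
          exact ht2.1.symm
        have hmin' : ∀ j, (hj : j < i.toNat) → rest[j]'(by omega) ≠ '/' := by
          intro j hj hje
          apply hmin j hj
          rw [List.drop_eq_getElem_cons (by omega : j < rest.length), hje]
          exact ⟨_, rfl⟩
        rw [pvSp_split rest i.toNat hlt hmin' hcur]
        have hlen : (rest.drop (i.toNat + 1)).length ≤ n := by
          simp [List.length_drop]; omega
        rw [dif_neg hi]
        cases hsp : pvSp (rest.drop (i.toNat + 1)) with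
        | nil => exact absurd hsp (pvSp_ne_nil _)
        | cons a l =>
            simp only [ih (rest.drop (i.toNat + 1)) hlen, hsp, pvLinksStr, List.append_assoc]

-- String-level formatting of a non-final chunk, as A's loop writes it
def pvFmt (chunk : String) : String :=
  pvTitle (PySem.Str.replace (PySem.Str.strip chunk) "-" " ")

-- the list of link anchors A's loop produces, as a recursion carrying the href prefix
def pvLinks : String → List String → List String
  | _, [] => []
  | p, c :: cs =>
      ("<a href=\"" ++ (p ++ "/" ++ c) ++ ".html\">" ++ pvFmt c ++ "</a>") :: pvLinks (p ++ "/" ++ c) cs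

theorem pvFoldA (cs : List String) (p : String) (acc : List String) :
    (cs.foldl
      (fun (st : String × List String) chunk =>
        (st.1 ++ "/" ++ chunk,
         st.2 ++ ["<a href=\"" ++ (st.1 ++ "/" ++ chunk) ++ ".html\">" ++
                  pvTitle (PySem.Str.replace (PySem.Str.strip chunk) "-" " ") ++ "</a>"]))
      (p, acc)).2 = acc ++ pvLinks p cs := by
  induction cs generalizing p acc with
  | nil => simp [pvLinks]
  | cons c tl ih =>
      simp only [List.foldl_cons, pvLinks]
      rw [ih]
      simp [pvFmt, List.append_assoc]

theorem pvJoinFlat (sep x : List Char) (xs : List (List Char)) :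
    PySem.Chars.join sep (x :: xs) = x ++ xs.flatMap (fun y => sep ++ y) := by
  induction xs generalizing x with
  | nil => simp [PySem.Chars.join_singleton]
  | cons y ys ih =>
      rw [PySem.Chars.join_cons_cons, ih y]
      simp [List.append_assoc]

theorem pvFmtBridge (c : String) : (pvFmt c).toList = pvFmtC c.toList := by
  simp [pvFmt, pvTitle, pvFmtC]

theorem pvFmtLastBridge (c : String) :
    (pvTitle (PySem.Str.replace (PySem.Str.replace (PySem.Str.strip c) ".html" "") "-" " ")).toList
      = pvFmtLastC c.toList := by
  simp [pvTitle, pvFmtLastC]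

theorem pvALem (cs : List String) (hne : cs ≠ []) : ∀ (p : String),
    ((pvLinks p cs.dropLast).map String.toList).flatMap (fun y => "<span> > </span>".toList ++ y)
      ++ ("<span> > ".toList ++ pvFmtLastC ((cs.getLast hne).toList) ++ "</span>".toList)
      = pvLinksStr (p.toList ++ ['/']) (cs.map String.toList) := by
  induction cs with
  | nil => exact absurd rfl hne
  | cons c tl ih =>
      intro p
      cases tl with
      | nil => simp [pvLinks, pvLinksStr]
      | cons c2 rest =>
          have h1 := ih (by simp) (p ++ "/" ++ c)
          simp only [List.dropLast_cons_of_ne_nil (by simp : c2 :: rest ≠ []),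
            List.getLast_cons (by simp : c2 :: rest ≠ [])] at *
          simp only [pvLinks, List.map_cons, List.flatMap_cons, pvLinksStr, List.map_cons] at *
          rw [List.append_assoc, h1]
          simp [List.append_assoc, pvFmtBridge]

-- ===== VERDICT (by name: the statement is the Claim_ definition above) =====
theorem breadcrumbs_spec : Claim_equal_breadcrumbs := by
  intro filepath _
  unfold Spec_breadcrumbs breadcrumbs breadcrumbs_alt
  set path := PySem.Str.replace filepath "website/" "" with hpath
  have hsplit : Option.map (fun x => List.map String.toList x) (PySem.Str.split? path "/")
      = some (pvSp path.toList) := by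
    rw [PySem.Str.split?_map]
    simp [PySem.Chars.split?, pvSplitOn_eq]
  obtain ⟨L, hL, hLmap⟩ : ∃ L, PySem.Str.split? path "/" = some L ∧ L.map String.toList = pvSp path.toList := by
    cases h : PySem.Str.split? path "/" with
    | none => rw [h] at hsplit; simp at hsplit
    | some L => rw [h] at hsplit; exact ⟨L, rfl, by simpa using hsplit⟩
  have hne : L ≠ [] := by
    intro h
    subst h
    exact pvSp_ne_nil path.toList (by simpa using hLmap.symm)
  simp only [hL, Option.getD_some, PySem.List.slice_to_neg_one, PySem.List.pyGet?_neg_one,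
    List.getLast?_eq_some_getLast hne]
  rw [pvFoldA]
  apply String.toList_inj.mp
  have hjoin : ∀ (l : List String), (PySem.Str.join "<span> > </span>" l).toList
      = PySem.Chars.join "<span> > </span>".toList (l.map String.toList) := by
    intro l; simp [PySem.Str.join]
  simp only [String.toList_append, hjoin, List.map_cons, List.map_nil, List.nil_append,
    List.cons_append]
  rw [pvJoinFlat]
  have hlast : (L.map String.toList).getLast (by simpa using hne) = (L.getLast hne).toList :=
    List.getLast_map _
  have hA := pvALem L hne ""
  rw [hLmap] at hA
  have hslash : ("/" : String).toList = ['/'] := rfl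
  have hnilL : ("" : String).toList = [] := rfl
  rw [hnilL, List.nil_append] at hA
  rw [pvGo_eq_linksStr path.toList.length path.toList le_rfl "/".toList, hslash,
      pvFmtLastBridge (L.getLast hne)]
  simp only [String.toList_ofList, ← hA, List.append_assoc]
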